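-- pv_equiv track=rewrite | github.com/VESIT-CMPN-Projects/2024-25-BE01 | indihealth-backend/try.py | simulate_dynamic_greedy
-- ===== SOURCE A (Python) =====
-- num_counters = 4
--
-- def simulate_dynamic_greedy(arrival_times, service_times):
--     queue = []  # To keep track of patients waiting
--     counters = [{'current_time': 0, 'queue': []} for _ in range(num_counters)]  # Initialize counters
--     wait_times = []
--
--     for arrival_time in arrival_times:
--         # Find the counter with the least load
--         counter_load = [(i, c['current_time']) for i, c in enumerate(counters)]
--         selected_counter_idx, _ = min(counter_load, key=lambda x: x[1])
--
--         # Assign patient to the selected counter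
--         start_time = max(arrival_time, counters[selected_counter_idx]['current_time'])
--         service_time = service_times[selected_counter_idx]
--         wait_time = start_time - arrival_time
--         wait_times.append(wait_time)
--
--         # Update counter's next available time
--         counters[selected_counter_idx]['current_time'] = start_time + service_time
--
--     return wait_times
-- ===== SOURCE B (Python) =====
-- num_counters = 4
--
-- def _insert_sorted(pq, entry):
--     for j, e in enumerate(pq):
--         if entry < e:
--             return pq[:j] + [entry] + pq[j:]
--     return pq + [entry]
--
-- def simulate_dynamic_greedy(arrival_times, service_times):
--     # ascending priority queue of (next_free_time, counter_idx); head = least-loaded counter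
--     pq = [(0, idx) for idx in range(num_counters)]
--     wait_times = []
--     for arrival_time in arrival_times:
--         current_time, idx = pq[0]
--         pq = pq[1:]
--         start_time = max(arrival_time, current_time)
--         service_time = service_times[idx]
--         wait_times.append(start_time - arrival_time)
--         pq = _insert_sorted(pq, (start_time + service_time, idx))
--     return wait_times
-- ===== Notes on version B (the rewrite author's own statement) =====
-- stated objective: idiomatic
-- what changed: Replaces A's per-arrival rebuild-and-min-scan of an (idx, load) list over the counter array with an ordered priority queue of (next_free_time, counter_idx) pairs: pop the head for the least-loaded counter and re-insert its updated entry in order.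
-- outside the precondition, e.g. on simulate_dynamic_greedy([0, 0], [-10]): A returns [0, 0], B returns [0, 0]
import Mathlib
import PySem

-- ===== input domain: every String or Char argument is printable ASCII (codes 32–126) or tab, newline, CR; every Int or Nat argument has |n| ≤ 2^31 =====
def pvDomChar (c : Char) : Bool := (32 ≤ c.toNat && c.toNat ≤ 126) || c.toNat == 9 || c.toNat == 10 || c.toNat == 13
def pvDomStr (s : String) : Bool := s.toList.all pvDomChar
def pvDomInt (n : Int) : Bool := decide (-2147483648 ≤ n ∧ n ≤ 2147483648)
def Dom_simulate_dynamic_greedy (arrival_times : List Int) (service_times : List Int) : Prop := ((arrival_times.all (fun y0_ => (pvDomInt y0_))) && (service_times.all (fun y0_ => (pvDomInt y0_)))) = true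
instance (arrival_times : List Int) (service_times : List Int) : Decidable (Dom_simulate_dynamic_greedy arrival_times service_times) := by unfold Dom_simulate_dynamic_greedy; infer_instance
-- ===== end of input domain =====

-- B replaces A's per-arrival min-scan over a counter array by an ordered priority queue
-- (pop head, ordered re-insert); same results, idiomatic priority-queue shape.

-- ===== PORT A =====
-- one loop body of A: a counter is (current_time, queue); queue is never filled (list stays [])
def pyStepA (service_times : List Int) (st : (List (Int × List Int)) × List Int) (arrival_time : Int) : (List (Int × List Int)) × List Int :=
  let counters := st.1
  let wait_times := st.2
  let counter_load := (PySem.List.enumerate counters 0).map (fun p => (p.1, p.2.1))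
  match PySem.List.min? counter_load (fun x => x.2) with
  | none => (counters, wait_times)      -- unreachable: counters has 4 entries
  | some sel =>
    let selected_counter_idx := sel.1
    -- counters[selected_counter_idx]: index comes from enumerate, always in range
    let c := PySem.List.pyGetD counters selected_counter_idx (0, [])
    let start_time := max arrival_time c.1
    match PySem.List.pyGet? service_times selected_counter_idx with
    | none => (counters, wait_times)    -- IndexError: excluded by Pre_
    | some service_time =>
      let wait_time := start_time - arrival_time
      (counters.set selected_counter_idx.toNat (start_time + service_time, c.2), wait_times ++ [wait_time])

def simulate_dynamic_greedy (arrival_times : List Int) (service_times : List Int) : List Int :=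
  let counters := (PySem.List.pyRange 0 4 1).map (fun _ => ((0:Int), ([] : List Int)))
  (arrival_times.foldl (pyStepA service_times) (counters, [])).2

-- ===== PORT B =====
-- _insert_sorted: insert before the first strictly greater entry (Python tuple <, lexicographic)
def pvInsertSorted (e : Int × Int) : List (Int × Int) → List (Int × Int)
  | [] => [e]
  | x :: xs => if e.1 < x.1 ∨ (e.1 = x.1 ∧ e.2 < x.2) then e :: x :: xs else x :: pvInsertSorted e xs

def pyStepB (service_times : List Int) (st : (List (Int × Int)) × List Int) (arrival_time : Int) : (List (Int × Int)) × List Int :=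
  match st.1 with
  | [] => st                             -- unreachable: queue always has 4 entries
  | (current_time, idx) :: rest =>
    let start_time := max arrival_time current_time
    match PySem.List.pyGet? service_times idx with
    | none => st                         -- IndexError: excluded by Pre_
    | some service_time =>
      (pvInsertSorted (start_time + service_time, idx) rest, st.2 ++ [start_time - arrival_time])

def simulate_dynamic_greedy_alt (arrival_times : List Int) (service_times : List Int) : List Int :=
  let pq := (PySem.List.pyRange 0 4 1).map (fun idx => ((0:Int), idx))
  (arrival_times.foldl (pyStepB service_times) (pq, [])).2

-- ===== PRECONDITION & SPEC =====
-- Pre_ excludes inputs whose service_times list is shorter than min(len(arrival_times), 4): there A's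
-- counter-indexed lookup service_times[idx] can raise IndexError. The closed-form bound is slightly
-- conservative, so a few short-service inputs on which A happens to return are excluded too.
def Pre_simulate_dynamic_greedy (arrival_times : List Int) (service_times : List Int) : Prop :=
  min arrival_times.length 4 ≤ service_times.length
instance (arrival_times : List Int) (service_times : List Int) : Decidable (Pre_simulate_dynamic_greedy arrival_times service_times) := by unfold Pre_simulate_dynamic_greedy; infer_instance

def pvWitness_simulate_dynamic_greedy : List Int × List Int := ([3, 1, 4, 1, 5], [2, 7, 1, 8])

def Spec_simulate_dynamic_greedy (arrival_times : List Int) (service_times : List Int) (out : List Int) : Prop := out = simulate_dynamic_greedy_alt arrival_times service_times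
instance (arrival_times : List Int) (service_times : List Int) (out : List Int) : Decidable (Spec_simulate_dynamic_greedy arrival_times service_times out) := by unfold Spec_simulate_dynamic_greedy; infer_instance

-- ===== CLAIM (what is proved, stated in full; the proofs are below) =====
def Claim_equal_simulate_dynamic_greedy : Prop := ∀ (arrival_times : List Int) (service_times : List Int), Dom_simulate_dynamic_greedy arrival_times service_times → Pre_simulate_dynamic_greedy arrival_times service_times → Spec_simulate_dynamic_greedy arrival_times service_times (simulate_dynamic_greedy arrival_times service_times)

-- ===== LEMMAS AND PROOFS =====

-- abstraction: the multiset of (current_time, idx) pairs carried by A's counter list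
def pairsB (cs : List (Int × List Int)) : List (Int × Int) :=
  (PySem.List.enumerate cs 0).map (fun p => (p.2.1, p.1))

-- the lexicographic ≤ the queue is sorted by
def pvLexLe (a b : Int × Int) : Prop := a.1 < b.1 ∨ (a.1 = b.1 ∧ a.2 ≤ b.2)

lemma pairsB_length (cs : List (Int × List Int)) : (pairsB cs).length = cs.length := by
  simp [pairsB, PySem.List.length_enumerate]

lemma pairsB_getElem (cs : List (Int × List Int)) (k : Nat) (hk : k < cs.length)
     :
    (pairsB cs)[k]'(by simp [pairsB_length]; exact hk) = ((cs[k]).1, (k : Int)) := by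
  simp [pairsB, PySem.List.getElem_enumerate]

lemma mem_pairsB (cs : List (Int × List Int)) (p : Int × Int) (hp : p ∈ pairsB cs) :
    ∃ (k : Nat) (hk : k < cs.length), p = ((cs[k]).1, (k : Int)) := by
  simp only [pairsB, List.mem_map] at hp
  obtain ⟨q, hq, rfl⟩ := hp
  rw [PySem.List.mem_enumerate_iff] at hq
  obtain ⟨k, hk, rfl⟩ := hq
  exact ⟨k, hk, by simp⟩

lemma pairsB_set (cs : List (Int × List Int)) (k : Nat) (hk : k < cs.length) (v : Int × List Int) :
    pairsB (cs.set k v) = (pairsB cs).set k (v.1, (k : Int)) := by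
  apply List.ext_getElem
  · simp [pairsB_length]
  · intro j hj hj'
    have hjlen : j < cs.length := by simpa [pairsB_length] using hj
    rw [List.getElem_set]
    by_cases hjk : k = j
    · subst hjk
      rw [pairsB_getElem (cs.set k v) k (by simpa using hjlen)]
      simp
    · rw [pairsB_getElem (cs.set k v) j (by simpa using hjlen),
          pairsB_getElem cs j hjlen]
      simp [hjk]

lemma pvInsertSorted_perm (e : Int × Int) (l : List (Int × Int)) :
    (pvInsertSorted e l).Perm (e :: l) := by
  induction l with
  | nil => simp [pvInsertSorted]
  | cons x xs ih =>
    simp only [pvInsertSorted]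
    split
    · exact List.Perm.refl _
    · exact (ih.cons x).trans (List.Perm.swap _ _ _)

lemma pvInsertSorted_pairwise (e : Int × Int) (l : List (Int × Int))
    (h : l.Pairwise pvLexLe) : (pvInsertSorted e l).Pairwise pvLexLe := by
  induction l with
  | nil => simp [pvInsertSorted, pvLexLe]
  | cons x xs ih =>
    rw [List.pairwise_cons] at h
    obtain ⟨hx, hxs⟩ := h
    simp only [pvInsertSorted]
    split
    · rename_i hlt
      rw [List.pairwise_cons]
      refine ⟨?_, by rw [List.pairwise_cons]; exact ⟨hx, hxs⟩⟩
      intro y hy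
      rcases List.mem_cons.mp hy with rfl | hy'
      · unfold pvLexLe; omega
      · have := hx y hy'
        unfold pvLexLe at this ⊢; omega
    · rename_i hnlt
      rw [List.pairwise_cons]
      refine ⟨?_, ih hxs⟩
      intro y hy
      have hy' : y = e ∨ y ∈ xs := by
        have := (pvInsertSorted_perm e xs).mem_iff.mp hy
        simpa using this
      rcases hy' with rfl | hy''
      · unfold pvLexLe; omega
      · exact hx y hy''

-- characterisation of PySem.List.min? (first minimum) on a list with strictly increasing fsts
lemma minScanChar : ∀ (t : List (Int × Int)) (x sel : Int × Int),
    PySem.List.min? (x :: t) (fun p => p.2) = some sel →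
    (∀ p ∈ t, x.1 < p.1) → t.Pairwise (fun a b => a.1 < b.1) →
    (sel = x ∨ sel ∈ t) ∧ (∀ p ∈ t, sel.2 ≤ p.2) ∧ sel.2 ≤ x.2 ∧
      (x.1 < sel.1 → sel.2 < x.2) ∧ (∀ p ∈ t, p.1 < sel.1 → sel.2 < p.2) := by
  intro t
  induction t with
  | nil =>
    intro x sel h _ _
    unfold PySem.List.min? at h
    simp only [List.foldl_cons, List.foldl_nil, Option.some.injEq] at h
    subst h
    refine ⟨Or.inl rfl, by simp, le_refl _, ?_, by simp⟩
    intro hlt; exact absurd hlt (lt_irrefl _)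
  | cons y t ih =>
    intro x sel h hxfst hpair
    rw [List.pairwise_cons] at hpair
    obtain ⟨hyfst, hpair'⟩ := hpair
    have hstep : PySem.List.min? (x :: y :: t) (fun p => p.2) =
        PySem.List.min? ((if y.2 < x.2 then y else x) :: t) (fun p => p.2) := by
      unfold PySem.List.min?
      by_cases hc : y.2 < x.2 <;> simp [hc]
    rw [hstep] at h
    by_cases hc : y.2 < x.2
    · rw [if_pos hc] at h
      obtain ⟨hmem, hall, hle, hcond, hfirst⟩ := ih y sel h hyfst hpair'
      refine ⟨?_, ?_, by omega, fun _ => by omega, ?_⟩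
      · rcases hmem with rfl | hm
        · exact Or.inr List.mem_cons_self
        · exact Or.inr (List.mem_cons_of_mem _ hm)
      · intro p hp
        rcases List.mem_cons.mp hp with hpy | hp'
        · rw [hpy]; exact hle
        · exact hall p hp'
      · intro p hp hplt
        rcases List.mem_cons.mp hp with hpy | hp'
        · rw [hpy] at hplt ⊢; exact hcond hplt
        · exact hfirst p hp' hplt
    · rw [if_neg hc] at h
      obtain ⟨hmem, hall, hle, hcond, hfirst⟩ := ih x sel h
        (fun p hp => hxfst p (List.mem_cons_of_mem _ hp)) hpair'
      have hxy : x.1 < y.1 := hxfst y List.mem_cons_self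
      refine ⟨?_, ?_, hle, hcond, ?_⟩
      · rcases hmem with rfl | hm
        · exact Or.inl rfl
        · exact Or.inr (List.mem_cons_of_mem _ hm)
      · intro p hp
        rcases List.mem_cons.mp hp with hpy | hp'
        · rw [hpy]; omega
        · exact hall p hp'
      · intro p hp hplt
        rcases List.mem_cons.mp hp with hpy | hp'
        · rw [hpy] at hplt ⊢
          have := hcond (lt_trans hxy hplt)
          omega
        · exact hfirst p hp' hplt

-- A's selection: first counter with minimal current_time
lemma min?_load_char (cs : List (Int × List Int)) (sel : Int × Int)
    (h : PySem.List.min? ((PySem.List.enumerate cs 0).map (fun p => (p.1, p.2.1))) (fun x => x.2) = some sel) :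
    ∃ (k : Nat) (hk : k < cs.length), sel = ((k : Int), (cs[k]).1) ∧
      (∀ (k' : Nat) (hk' : k' < cs.length), sel.2 ≤ (cs[k']).1) ∧
      (∀ (k' : Nat) (hk' : k' < cs.length), (k' : Int) < sel.1 → sel.2 < (cs[k']).1) := by
  unfold PySem.List.min? at h
  set l := (PySem.List.enumerate cs 0).map (fun p => ((p.1 : Int), p.2.1)) with hldef
  have hmem_load : ∀ p ∈ l, ∃ (k : Nat) (hk : k < cs.length), p = ((k : Int), (cs[k]).1) := by
    intro p hp
    simp only [hldef, List.mem_map] at hp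
    obtain ⟨q, hq, rfl⟩ := hp
    rw [PySem.List.mem_enumerate_iff] at hq
    obtain ⟨k, hk, rfl⟩ := hq
    exact ⟨k, hk, by simp⟩
  have hgetl : ∀ (k : Nat) (hk : k < cs.length),
      l[k]'(by simp [hldef, PySem.List.length_enumerate]; exact hk) = ((k : Int), (cs[k]).1) := by
    intro k hk
    simp [hldef, PySem.List.getElem_enumerate]
  have hpairl : l.Pairwise (fun a b => a.1 < b.1) := by
    exact List.Pairwise.map _ (fun a b hab => hab) (PySem.List.pairwise_lt_enumerate cs 0)
  have hmemk : ∀ (k : Nat) (hk : k < cs.length), ((k : Int), (cs[k]).1) ∈ l := by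
    intro k hk
    rw [← hgetl k hk]
    exact List.getElem_mem _
  rcases hcase : l with _ | ⟨x, t⟩
  · rw [hcase] at h
    simp at h
  · rw [hcase] at h hmem_load hmemk hpairl
    rw [List.pairwise_cons] at hpairl
    obtain ⟨hxfst, hpair'⟩ := hpairl
    obtain ⟨hmem, hall, hle, hcond, hfirst⟩ := minScanChar t x sel h hxfst hpair'
    -- combined per-element facts over the whole list x :: t
    have hfacts : ∀ p ∈ x :: t, sel.2 ≤ p.2 ∧ (p.1 < sel.1 → sel.2 < p.2) := by
      intro p hp
      rcases List.mem_cons.mp hp with hpx | hp'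
      · subst hpx
        refine ⟨hle, ?_⟩
        intro hplt
        exact hcond hplt
      · exact ⟨hall p hp', fun hplt => hfirst p hp' hplt⟩
    have hselmem : sel ∈ x :: t := by
      rcases hmem with rfl | hm
      · exact List.mem_cons_self
      · exact List.mem_cons_of_mem _ hm
    obtain ⟨k, hk, hsel⟩ := hmem_load sel hselmem
    refine ⟨k, hk, hsel, ?_, ?_⟩
    · intro k' hk'
      exact (hfacts _ (hmemk k' hk')).1
    · intro k' hk' hlt
      exact (hfacts _ (hmemk k' hk')).2 hlt

-- the main loop invariant
lemma loop_eq (serv : List Int) :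
    ∀ (arr : List Int) (j : Nat) (cs : List (Int × List Int)) (pq : List (Int × Int)) (wa : List Int),
    cs.length = 4 →
    min (j + arr.length) 4 ≤ serv.length →
    (serv.length < 4 → ∀ (k : Nat) (hk : k < cs.length), j ≤ k → (cs[k]).1 = 0) →
    pq.Pairwise pvLexLe →
    pq.Perm (pairsB cs) →
    (arr.foldl (pyStepA serv) (cs, wa)).2 = (arr.foldl (pyStepB serv) (pq, wa)).2 := by
  intro arr
  induction arr with
  | nil => intro j cs pq wa _ _ _ _ _; rfl
  | cons a arr ih =>
    intro j cs pq wa hlen hserv hzero hsort hperm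
    -- A's selection
    rcases hmin : PySem.List.min? ((PySem.List.enumerate cs 0).map (fun p => (p.1, p.2.1)))
        (fun x => x.2) with _ | sel
    · rw [PySem.List.min?_eq_none_iff] at hmin
      simp only [List.map_eq_nil_iff] at hmin
      have hl0 : cs.length = 0 := by
        have := congrArg List.length hmin
        simpa [PySem.List.length_enumerate] using this
      exfalso; omega
    obtain ⟨kA, hkA, hsel, hminA, hfirstA⟩ := min?_load_char cs sel hmin
    -- B's queue head
    rcases hpqc : pq with _ | ⟨hd, rest⟩
    · rw [hpqc] at hperm
      have := hperm.length_eq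
      rw [pairsB_length, hlen] at this
      simp at this
    rw [hpqc] at hsort hperm
    have hhd_mem : hd ∈ pairsB cs := hperm.mem_iff.mp List.mem_cons_self
    obtain ⟨kB, hkB, hhd⟩ := mem_pairsB cs hd hhd_mem
    have hminB : ∀ p ∈ pairsB cs, pvLexLe hd p := by
      intro p hp
      rcases List.mem_cons.mp (hperm.mem_iff.mpr hp) with hph | hpr
      · rw [← hph]; unfold pvLexLe; omega
      · exact (List.pairwise_cons.mp hsort).1 p hpr
    -- the two selections coincide
    have hmemA : ((cs[kA]).1, (kA : Int)) ∈ pairsB cs := by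
      rw [← pairsB_getElem cs kA hkA]
      exact List.getElem_mem _
    have hAB : kA = kB := by
      have h1 : sel.2 ≤ (cs[kB]).1 := hminA kB hkB
      rw [hsel] at h1
      simp only at h1
      have h2 := hminB _ hmemA
      rw [hhd] at h2
      unfold pvLexLe at h2
      simp only at h2
      by_cases hlt : kB < kA
      · have h3 := hfirstA kB hkB (by rw [hsel]; simp only; exact_mod_cast hlt)
        rw [hsel] at h3
        simp only at h3
        omega
      · omega
    subst hAB
    have hhd' : hd = ((cs[kA]).1, (kA : Int)) := hhd
    -- selected index is a valid index into service_times
    have hka_le : serv.length < 4 → kA ≤ j := by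
      intro hs4
      have hj4 : j < 4 := by simp at hserv; omega
      have hzj : (cs[j]'(by omega)).1 = 0 := hzero hs4 j (by omega) (le_refl j)
      by_contra hgt
      have hzk : (cs[kA]).1 = 0 := hzero hs4 kA hkA (by omega)
      have := hfirstA j (by omega) (by rw [hsel]; simp; omega)
      rw [hsel] at this; simp only at this
      rw [hzj] at this
      omega
    have hserv' : kA < serv.length := by
      by_cases h4 : 4 ≤ serv.length
      · omega
      · have := hka_le (by omega)
        simp at hserv
        omega
    have hs_eq : PySem.List.pyGet? serv ((kA : Int)) = some (serv[kA]) := by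
      rw [PySem.List.pyGet?_natCast]
      exact List.getElem?_eq_getElem hserv'
    -- evaluate one step of A
    have hA : pyStepA serv (cs, wa) a =
        (cs.set kA (max a (cs[kA]).1 + serv[kA], (cs[kA]).2), wa ++ [max a (cs[kA]).1 - a]) := by
      unfold pyStepA
      simp only [hmin, hsel, hs_eq]
      rw [PySem.List.pyGetD_eq_getElem cs (0, []) (by positivity) (by exact_mod_cast hkA)]
      simp
    -- evaluate one step of B
    have hB : pyStepB serv ((hd.1, hd.2) :: rest, wa) a =
        (pvInsertSorted (max a (cs[kA]).1 + serv[kA], (kA : Int)) rest,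
          wa ++ [max a (cs[kA]).1 - a]) := by
      unfold pyStepB
      rw [hhd']
      simp only [hs_eq]
    rw [List.foldl_cons, List.foldl_cons, hA]
    have hhd2 : hd = (hd.1, hd.2) := rfl
    rw [← hhd2] at hB
    rw [hB]
    -- re-establish the invariant and apply the induction hypothesis
    apply ih (j + 1)
    · simp [hlen]
    · simp at hserv ⊢; omega
    · intro hs4 k hk hjk
      have hkl : k < cs.length := by simpa using hk
      have hkane : kA ≠ k := by have := hka_le hs4; omega
      rw [List.getElem_set_ne hkane]
      exact hzero hs4 k hkl (by omega)
    · exact pvInsertSorted_pairwise _ rest hsort.of_cons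
    · -- permutation invariant
      have hset : pairsB (cs.set kA (max a (cs[kA]).1 + serv[kA], (cs[kA]).2)) =
          (pairsB cs).set kA (max a (cs[kA]).1 + serv[kA], (kA : Int)) :=
        pairsB_set cs kA hkA _
      rw [hset]
      have hkAp : kA < (pairsB cs).length := by rw [pairsB_length]; exact hkA
      have hdecomp : pairsB cs =
          (pairsB cs).take kA ++ hd :: (pairsB cs).drop (kA + 1) := by
        rw [hhd', ← pairsB_getElem cs kA hkA, List.getElem_cons_drop, List.take_append_drop]
      have hrest : rest.Perm ((pairsB cs).take kA ++ (pairsB cs).drop (kA + 1)) := by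
        apply List.Perm.cons_inv (a := hd)
        have h5 : (pairsB cs).Perm (hd :: ((pairsB cs).take kA ++ (pairsB cs).drop (kA + 1))) := by
          conv_lhs => rw [hdecomp]
          exact List.perm_middle
        exact hperm.trans h5
      rw [List.set_eq_take_append_cons_drop, if_pos hkAp]
      exact (pvInsertSorted_perm _ _).trans ((hrest.cons _).trans List.perm_middle.symm)

-- ===== VERDICT (by name: the statement is the Claim_ definition above) =====
theorem simulate_dynamic_greedy_spec : Claim_equal_simulate_dynamic_greedy := by
  unfold Claim_equal_simulate_dynamic_greedy
  intro arr serv _ hpre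
  unfold Spec_simulate_dynamic_greedy
  unfold simulate_dynamic_greedy simulate_dynamic_greedy_alt
  have hcs : (PySem.List.pyRange 0 4 1).map (fun _ => ((0:Int), ([] : List Int))) = [(0, []), (0, []), (0, []), (0, [])] := by decide
  have hpq : (PySem.List.pyRange 0 4 1).map (fun idx => ((0:Int), idx)) = [(0, 0), (0, 1), (0, 2), (0, 3)] := by decide
  rw [hcs, hpq]
  have hpairs : pairsB [(0, []), (0, []), (0, []), (0, [])] = [(0, 0), (0, 1), (0, 2), (0, 3)] := by decide
  apply loop_eq serv arr 0
  · rfl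
  · unfold Pre_simulate_dynamic_greedy at hpre; omega
  · intro _ k hk _
    have hk4 : k < 4 := by simpa using hk
    interval_cases k <;> rfl
  · simp [pvLexLe, List.pairwise_cons]
  · rw [hpairs]
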